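-- pv_equiv track=rewrite | github.com/YanpeiTian/CS221 | ExpectiMax_Agent/ExpectiMax.py | getColUtility
-- ===== SOURCE A (Python) =====
-- FOUR_SEQ = 32
--
-- THREE_SEQ = 8
--
-- TWO_SEQ = 4
--
-- def getColUtility(grid, col):
--     prev = grid[0][col]
--     index = 1
--
--     # decreasing sequence
--     while index < 4 and grid[index][col] <= prev:
--         prev = grid[index][col]
--         index += 1
--     bestSeq = index
--
--     # increasing sequence
--     prev = grid[0][col]
--     index = 1
--     while index < 4 and grid[index][col] >= prev:
--         prev = grid[index][col]
--         index += 1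
--
--     bestSeq = max(bestSeq, index)
--
--     if bestSeq == 4:
--         return FOUR_SEQ
--     elif bestSeq == 3:
--         return THREE_SEQ
--     elif bestSeq == 2:
--         return TWO_SEQ
--     else:
--         return 1
-- ===== SOURCE B (Python) =====
-- def getColUtility(grid, col):
--     # single merged top-down pass maintaining both run lengths at once
--     prev = grid[0][col]
--     incLen = 1
--     decLen = 1
--     stillInc = True
--     stillDec = True
--     i = 1
--     while i < 4 and (stillInc or stillDec):
--         v = grid[i][col]
--         if stillInc and v >= prev:
--             incLen += 1
--         else:
--             stillInc = False
--         if stillDec and v <= prev: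
--             decLen += 1
--         else:
--             stillDec = False
--         prev = v
--         i += 1
--     return {4: 32, 3: 8, 2: 4}.get(max(incLen, decLen), 1)
-- ===== Notes on version B (the rewrite author's own statement) =====
-- stated objective: simpler
-- what changed: Replaces A's two sequential while-loops (one per direction, each re-scanning the column) by a single merged top-down pass that maintains both run lengths with alive-flags, and replaces the if/elif score ladder by a dict lookup.
import Mathlib
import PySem

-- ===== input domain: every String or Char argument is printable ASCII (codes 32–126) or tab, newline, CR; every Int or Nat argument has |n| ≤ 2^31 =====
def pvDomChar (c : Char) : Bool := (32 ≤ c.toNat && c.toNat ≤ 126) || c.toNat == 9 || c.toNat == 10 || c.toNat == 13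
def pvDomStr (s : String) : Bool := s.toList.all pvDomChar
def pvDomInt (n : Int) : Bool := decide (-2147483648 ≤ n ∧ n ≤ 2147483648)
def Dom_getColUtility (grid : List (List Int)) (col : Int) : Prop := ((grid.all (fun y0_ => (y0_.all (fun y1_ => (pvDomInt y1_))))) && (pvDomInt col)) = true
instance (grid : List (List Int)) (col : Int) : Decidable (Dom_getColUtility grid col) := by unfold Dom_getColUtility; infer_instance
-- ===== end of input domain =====

-- B replaces A's two sequential direction scans by one merged pass with two run counters; objective: simpler.

-- grid[i][col] (row index i is a nonnegative loop counter; col may be negative, Python indexing);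
-- default 0 is only reached outside Pre_ (where the Python raises IndexError)
def pvCell (grid : List (List Int)) (col : Int) (i : Nat) : Int :=
  (PySem.List.pyGet? ((PySem.List.pyGet? grid (i : Int)).getD []) col).getD 0

-- ===== PORT A =====
-- first while loop of A: decreasing sequence
def pvA_dec (grid : List (List Int)) (col : Int) (prev : Int) (index : Nat) : Nat :=
  if index < 4 then
    if pvCell grid col index ≤ prev then pvA_dec grid col (pvCell grid col index) (index + 1)
    else index
  else index
termination_by 4 - index

-- second while loop of A: increasing sequence
def pvA_inc (grid : List (List Int)) (col : Int) (prev : Int) (index : Nat) : Nat :=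
  if index < 4 then
    if pvCell grid col index ≥ prev then pvA_inc grid col (pvCell grid col index) (index + 1)
    else index
  else index
termination_by 4 - index

def getColUtility (grid : List (List Int)) (col : Int) : Int :=
  let bestSeq := max (pvA_dec grid col (pvCell grid col 0) 1) (pvA_inc grid col (pvCell grid col 0) 1)
  if bestSeq = 4 then 32
  else if bestSeq = 3 then 8
  else if bestSeq = 2 then 4
  else 1

-- ===== PORT B =====
-- B's single merged while loop: state (prev, incLen, decLen, stillInc, stillDec, i)
def pvB_loop (grid : List (List Int)) (col : Int) (prev : Int) (incLen decLen : Nat)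
    (stillInc stillDec : Bool) (i : Nat) : Nat :=
  if i < 4 ∧ (stillInc || stillDec) then
    let v := pvCell grid col i
    let si := stillInc && decide (v ≥ prev)
    let sd := stillDec && decide (v ≤ prev)
    pvB_loop grid col v (if si then incLen + 1 else incLen) (if sd then decLen + 1 else decLen)
      si sd (i + 1)
  else max incLen decLen
termination_by 4 - i

def getColUtility_alt (grid : List (List Int)) (col : Int) : Int :=
  PySem.Dict.getD (PySem.Dict.ofList [((4 : Nat), (32 : Int)), (3, 8), (2, 4)])
    (pvB_loop grid col (pvCell grid col 0) 1 1 true true 1) 1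

-- ===== PRECONDITION & SPEC =====
-- Pre_ = exactly the inputs on which Python A returns: rows 0..2 are always read (row 2 because
-- whatever the order of the first two cells, one of the two direction loops continues past index 1),
-- and row 3 is read iff the first three cells form a monotone chain in either direction.
def Pre_getColUtility (grid : List (List Int)) (col : Int) : Prop :=
  (0 < grid.length ∧ PySem.Raise.InRange (grid.getD 0 []).length col) ∧
  (1 < grid.length ∧ PySem.Raise.InRange (grid.getD 1 []).length col) ∧
  (2 < grid.length ∧ PySem.Raise.InRange (grid.getD 2 []).length col) ∧
  (((pvCell grid col 1 ≤ pvCell grid col 0 ∧ pvCell grid col 2 ≤ pvCell grid col 1) ∨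
    (pvCell grid col 1 ≥ pvCell grid col 0 ∧ pvCell grid col 2 ≥ pvCell grid col 1)) →
    (3 < grid.length ∧ PySem.Raise.InRange (grid.getD 3 []).length col))
instance (grid : List (List Int)) (col : Int) : Decidable (Pre_getColUtility grid col) := by
  unfold Pre_getColUtility; infer_instance

def pvWitness_getColUtility : List (List Int) × Int := ([[2], [4], [1]], 0)

def Spec_getColUtility (grid : List (List Int)) (col : Int) (out : Int) : Prop := out = getColUtility_alt grid col
instance (grid : List (List Int)) (col : Int) (out : Int) : Decidable (Spec_getColUtility grid col out) := by unfold Spec_getColUtility; infer_instance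

-- ===== CLAIM (what is proved, stated in full; the proofs are below) =====
def Claim_equal_getColUtility : Prop := ∀ (grid : List (List Int)) (col : Int), Dom_getColUtility grid col → Pre_getColUtility grid col → Spec_getColUtility grid col (getColUtility grid col)

-- ===== LEMMAS AND PROOFS =====

theorem pvA_dec4 (grid : List (List Int)) (col : Int) (p : Int) :
    pvA_dec grid col p 4 = 4 := by rw [pvA_dec]; simp

theorem pvA_dec3 (grid : List (List Int)) (col : Int) (p : Int) :
    pvA_dec grid col p 3 = if pvCell grid col 3 ≤ p then 4 else 3 := by
  rw [pvA_dec]; simp [pvA_dec4]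

theorem pvA_dec2 (grid : List (List Int)) (col : Int) (p : Int) :
    pvA_dec grid col p 2 =
      if pvCell grid col 2 ≤ p then
        (if pvCell grid col 3 ≤ pvCell grid col 2 then 4 else 3) else 2 := by
  rw [pvA_dec]; simp [pvA_dec3]

theorem pvA_dec1 (grid : List (List Int)) (col : Int) (p : Int) :
    pvA_dec grid col p 1 =
      if pvCell grid col 1 ≤ p then
        (if pvCell grid col 2 ≤ pvCell grid col 1 then
          (if pvCell grid col 3 ≤ pvCell grid col 2 then 4 else 3) else 2) else 1 := by
  rw [pvA_dec]; simp [pvA_dec2]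

theorem pvA_inc4 (grid : List (List Int)) (col : Int) (p : Int) :
    pvA_inc grid col p 4 = 4 := by rw [pvA_inc]; simp

theorem pvA_inc3 (grid : List (List Int)) (col : Int) (p : Int) :
    pvA_inc grid col p 3 = if p ≤ pvCell grid col 3 then 4 else 3 := by
  rw [pvA_inc]; simp [pvA_inc4, ge_iff_le]

theorem pvA_inc2 (grid : List (List Int)) (col : Int) (p : Int) :
    pvA_inc grid col p 2 =
      if p ≤ pvCell grid col 2 then
        (if pvCell grid col 2 ≤ pvCell grid col 3 then 4 else 3) else 2 := by
  rw [pvA_inc]; simp [pvA_inc3, ge_iff_le]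

theorem pvA_inc1 (grid : List (List Int)) (col : Int) (p : Int) :
    pvA_inc grid col p 1 =
      if p ≤ pvCell grid col 1 then
        (if pvCell grid col 1 ≤ pvCell grid col 2 then
          (if pvCell grid col 2 ≤ pvCell grid col 3 then 4 else 3) else 2) else 1 := by
  rw [pvA_inc]; simp [pvA_inc2, ge_iff_le]

theorem pvB4 (grid : List (List Int)) (col : Int) (p : Int) (il dl : Nat) (si sd : Bool) :
    pvB_loop grid col p il dl si sd 4 = max il dl := by rw [pvB_loop]; simp

theorem pvB3 (grid : List (List Int)) (col : Int) (p : Int) (il dl : Nat) (si sd : Bool) :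
    pvB_loop grid col p il dl si sd 3 =
      max (if si ∧ p ≤ pvCell grid col 3 then il + 1 else il)
          (if sd ∧ pvCell grid col 3 ≤ p then dl + 1 else dl) := by
  cases si <;> cases sd <;> rw [pvB_loop] <;> simp [pvB4, ge_iff_le]

theorem pvB2 (grid : List (List Int)) (col : Int) (p : Int) (il dl : Nat) (si sd : Bool) :
    pvB_loop grid col p il dl si sd 2 =
      max (if si ∧ p ≤ pvCell grid col 2 then
             (if pvCell grid col 2 ≤ pvCell grid col 3 then il + 2 else il + 1) else il)
          (if sd ∧ pvCell grid col 2 ≤ p then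
             (if pvCell grid col 3 ≤ pvCell grid col 2 then dl + 2 else dl + 1) else dl) := by
  cases si <;> cases sd <;> rw [pvB_loop] <;> simp [pvB3, ge_iff_le] <;>
    split_ifs <;> omega

theorem pvB1 (grid : List (List Int)) (col : Int) (p : Int) :
    pvB_loop grid col p 1 1 true true 1 =
      max (if p ≤ pvCell grid col 1 then
             (if pvCell grid col 1 ≤ pvCell grid col 2 then
               (if pvCell grid col 2 ≤ pvCell grid col 3 then 4 else 3) else 2) else 1)
          (if pvCell grid col 1 ≤ p then
             (if pvCell grid col 2 ≤ pvCell grid col 1 then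
               (if pvCell grid col 3 ≤ pvCell grid col 2 then 4 else 3) else 2) else 1) := by
  rw [pvB_loop]
  simp [pvB2, ge_iff_le]
  split_ifs <;> simp_all

-- the merged loop equals the max of the two direction loops
theorem pvB_loop_eq (grid : List (List Int)) (col : Int) :
    pvB_loop grid col (pvCell grid col 0) 1 1 true true 1 =
      max (pvA_inc grid col (pvCell grid col 0) 1) (pvA_dec grid col (pvCell grid col 0) 1) := by
  rw [pvB1, pvA_inc1, pvA_dec1]

theorem pvA_dec1_le (grid : List (List Int)) (col : Int) (p : Int) :
    pvA_dec grid col p 1 ≤ 4 := by rw [pvA_dec1]; split_ifs <;> omega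

theorem pvA_inc1_le (grid : List (List Int)) (col : Int) (p : Int) :
    pvA_inc grid col p 1 ≤ 4 := by rw [pvA_inc1]; split_ifs <;> omega

-- the score table agrees with A's if/elif ladder on every possible bestSeq value
theorem pvTable (n : Nat) (h : n ≤ 4) :
    PySem.Dict.getD (PySem.Dict.ofList [((4 : Nat), (32 : Int)), (3, 8), (2, 4)]) n 1 =
      if n = 4 then 32 else if n = 3 then 8 else if n = 2 then 4 else 1 := by
  interval_cases n <;> decide

-- ===== VERDICT (by name: the statement is the Claim_ definition above) =====
theorem getColUtility_spec : Claim_equal_getColUtility := by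
  intro grid col _ _
  unfold Spec_getColUtility getColUtility getColUtility_alt
  rw [pvB_loop_eq, pvTable _ (by
    exact max_le (pvA_inc1_le grid col _) (pvA_dec1_le grid col _)), Nat.max_comm]
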